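-- pv_equiv track=rewrite | github.com/shanshanyu/pythonProject | algorithm/max_sub_str.py | max_sub_str
-- ===== SOURCE A (Python) =====
-- def max_sub_str(s,k):
--     '''
--            通过双指针解决
--            先取最左边的k个字符
--            然后判断元音字母的个数，和之前保存的max_count比较取大
--            右指针加1，左指针加1
--            判断左指针指向的字符和右指针指向的字符是否是元音字母
--            判断元音字母的个数，和之前保存的max_count比较取大
--     '''
--     am_str = 'aeiou'
--     ans = 0
--     for i in s[0:k]:
--         if i in am_str:
--             ans += 1
--
--     tmp_ans = ans
--     left = 0
--     length = len(s)
--     for right in range(k, length):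
--         if s[right] in am_str and s[left] not in am_str:
--             tmp_ans += 1
--         elif s[right] not in am_str and s[left] in am_str:
--             tmp_ans -= 1
--
--         left += 1
--
--         ans = max(ans, tmp_ans)
--
--     return ans
-- ===== SOURCE B (Python) =====
-- def max_sub_str(s, k):
--     # prefix-sum re-implementation: P[i] = vowels in s[:i]; window count = P[i+k]-P[i]
--     P = [0]
--     acc = 0
--     for c in s:
--         acc += c in 'aeiou'
--         P.append(acc)
--     n = len(s)
--     if k >= n:
--         return P[n]
--     best = P[k]
--     for i in range(1, n - k + 1):
--         best = max(best, P[i + k] - P[i])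
--     return best
-- ===== Notes on version B (the rewrite author's own statement) =====
-- stated objective: alternative
-- what changed: Replaces the sliding-window two-pointer update (+1/-1 on vowel entering/leaving) by a prefix-sum array of vowel counts and a max over window differences P[i+k]-P[i].
import Mathlib
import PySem

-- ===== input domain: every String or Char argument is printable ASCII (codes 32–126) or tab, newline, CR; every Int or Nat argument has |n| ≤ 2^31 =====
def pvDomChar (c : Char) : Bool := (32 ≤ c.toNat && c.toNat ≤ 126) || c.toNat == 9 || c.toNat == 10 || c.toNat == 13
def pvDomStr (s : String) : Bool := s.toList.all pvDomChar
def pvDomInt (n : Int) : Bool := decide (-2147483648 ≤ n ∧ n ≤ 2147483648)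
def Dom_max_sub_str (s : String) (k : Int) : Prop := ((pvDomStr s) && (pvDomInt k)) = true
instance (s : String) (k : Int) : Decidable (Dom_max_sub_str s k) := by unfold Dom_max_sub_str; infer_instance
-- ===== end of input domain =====

-- B replaces A's sliding-window ±1 update by a prefix-sum array of vowel counts and a max over
-- window differences P[i+k]-P[i] (alternative decomposition, same O(n) cost); equal for 0 ≤ k.

-- ===== PORT A =====
-- shared by both ports: 'c in "aeiou"' on a single character = membership in the vowel list (exact for 1-char strings)
def pvVowel (c : Char) : Bool := ['a','e','i','o','u'].contains c

def max_sub_str (s : String) (k : Int) : Int :=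
  let cs := s.toList
  -- ans = vowels in s[0:k]
  let ans : Int := (PySem.List.slice cs (some 0) (some k)).foldl
      (fun a i => if pvVowel i then a + 1 else a) 0
  let length : Int := PySem.List.len cs
  -- state (tmp_ans, left, ans); s[right]/s[left] via pyGetD: in range on every input with 0 ≤ k (Pre_)
  let st := (PySem.List.pyRange k length 1).foldl
      (fun (st : Int × Int × Int) right =>
        let tmp := st.1; let left := st.2.1; let a := st.2.2
        let tmp' := if pvVowel (PySem.List.pyGetD cs right ' ') ∧ ¬ pvVowel (PySem.List.pyGetD cs left ' ')
                    then tmp + 1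
                    else if ¬ pvVowel (PySem.List.pyGetD cs right ' ') ∧ pvVowel (PySem.List.pyGetD cs left ' ')
                    then tmp - 1 else tmp
        (tmp', left + 1, max a tmp'))
      (ans, 0, ans)
  st.2.2

-- ===== PORT B =====

def max_sub_str_alt (s : String) (k : Int) : Int :=
  let cs := s.toList
  -- build prefix-sum list P, state (P, acc)
  let st := cs.foldl
      (fun (st : List Int × Int) c =>
        let acc := st.2 + (if pvVowel c then 1 else 0)
        (st.1 ++ [acc], acc))
      ([0], 0)
  let P := st.1
  let n : Int := PySem.List.len cs
  if k ≥ n then PySem.List.pyGetD P n 0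
  else
    let best : Int := PySem.List.pyGetD P k 0
    (PySem.List.pyRange 1 (n - k + 1) 1).foldl
      (fun best i => max best (PySem.List.pyGetD P (i + k) 0 - PySem.List.pyGetD P i 0)) best

-- ===== PRECONDITION & SPEC =====
-- Pre_ excludes k < 0 only: there Python A always raises IndexError (s[left] runs past the end).
def Pre_max_sub_str (s : String) (k : Int) : Prop := 0 ≤ k
instance (s : String) (k : Int) : Decidable (Pre_max_sub_str s k) := by unfold Pre_max_sub_str; infer_instance
def pvWitness_max_sub_str : String × Int := ("aeixou", 3)

def Spec_max_sub_str (s : String) (k : Int) (out : Int) : Prop := out = max_sub_str_alt s k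
instance (s : String) (k : Int) (out : Int) : Decidable (Spec_max_sub_str s k out) := by unfold Spec_max_sub_str; infer_instance

-- ===== CLAIM (what is proved, stated in full; the proofs are below) =====
def Claim_equal_max_sub_str : Prop := ∀ (s : String) (k : Int), Dom_max_sub_str s k → Pre_max_sub_str s k → Spec_max_sub_str s k (max_sub_str s k)

-- ===== LEMMAS AND PROOFS =====

-- pvPf cs i = number of vowels among the first i characters (the value P[i])
def pvPf (cs : List Char) (i : Nat) : Int := ((cs.take i).countP pvVowel : Int)

lemma pvPf_succ (cs : List Char) (m : Nat) (h : m < cs.length) :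
    pvPf cs (m+1) = pvPf cs m + (if pvVowel cs[m] then 1 else 0) := by
  unfold pvPf
  rw [List.take_add_one, List.getElem?_eq_getElem h, List.countP_append]
  cases hb : pvVowel cs[m] <;> simp [hb]

-- A's if/elif window update, rewritten as '+ vowel(right) - vowel(left)'
lemma pvIf (t : Int) (r l : Bool) :
    (if r = true ∧ ¬ l = true then t+1 else if ¬ r = true ∧ l = true then t-1 else t)
      = t + (if r then (1:Int) else 0) - (if l then 1 else 0) := by
  cases r <;> cases l <;> simp

-- A's loop body in the '+/-' form
def pvStep (cs : List Char) (st : Int × Int × Int) (right : Int) : Int × Int × Int :=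
  let tmp' := st.1 + (if pvVowel (PySem.List.pyGetD cs right ' ') then (1:Int) else 0)
              - (if pvVowel (PySem.List.pyGetD cs st.2.1 ' ') then (1:Int) else 0)
  (tmp', st.2.1 + 1, max st.2.2 tmp')

lemma pvStep_eval (cs : List Char) (left kn : Nat) (acc : Int)
    (hl : left < cs.length) (hr : left + kn < cs.length) :
    pvStep cs (pvPf cs (left+kn) - pvPf cs left, (left : Int), acc) ((left + kn : Nat) : Int)
    = (pvPf cs ((left+1)+kn) - pvPf cs (left+1), ((left + 1 : Nat) : Int),
       max acc (pvPf cs ((left+1)+kn) - pvPf cs (left+1))) := by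
  have e1 := pvPf_succ cs (left+kn) hr
  have e2 := pvPf_succ cs left hl
  have h3 : (left+1)+kn = (left+kn)+1 := by ring
  simp only [pvStep, PySem.List.pyGetD_natCast, List.getD_eq_getElem _ _ hr,
    List.getD_eq_getElem _ _ hl, h3, e1, e2]
  refine Prod.ext (by ring) (Prod.ext (by push_cast; ring) (by simp; ring_nf))

-- invariant of A's sliding-window loop: it computes the running max of the window sums
lemma pvLoopA (cs : List Char) (kn : Nat) :
    ∀ (cnt left : Nat) (acc : Int), left + kn + cnt = cs.length →
    ((PySem.List.pyRange ((left + kn : Nat) : Int) ((cs.length : Nat) : Int) 1).foldl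
        (pvStep cs) (pvPf cs (left+kn) - pvPf cs left, (left : Int), acc)).2.2
    = (List.range' (left+1) cnt).foldl (fun a j => max a (pvPf cs (j+kn) - pvPf cs j)) acc := by
  intro cnt
  induction cnt with
  | zero =>
    intro left acc h
    rw [PySem.List.pyRange_one_eq_nil (by exact_mod_cast (by omega : cs.length ≤ left + kn))]
    simp
  | succ cnt ih =>
    intro left acc h
    rw [PySem.List.pyRange_one_cons (by exact_mod_cast (by omega : left + kn < cs.length))]
    have hc1 : ((left + kn : Nat) : Int) + 1 = (((left+1) + kn : Nat) : Int) := by push_cast; ring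
    rw [List.foldl_cons, pvStep_eval cs left kn acc (by omega) (by omega), hc1,
      ih (left+1) _ (by omega), List.range'_succ, List.foldl_cons]

-- B's prefix-sum loop builds exactly the list of pvPf values
lemma pvBuild (cs : List Char) (pre : List Int) (a : Int) :
    cs.foldl (fun (st : List Int × Int) c =>
        (st.1 ++ [st.2 + (if pvVowel c then 1 else 0)], st.2 + (if pvVowel c then 1 else 0)))
      (pre, a)
    = (pre ++ (List.range cs.length).map (fun j => a + pvPf cs (j+1)), a + pvPf cs cs.length) := by
  induction cs generalizing pre a with
  | nil => simp [pvPf]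
  | cons c t ih =>
    have hpf : ∀ m : Nat, pvPf (c :: t) (m+1) = (if pvVowel c then (1:Int) else 0) + pvPf t m := by
      intro m; unfold pvPf
      rw [List.take_succ_cons, List.countP_cons]
      cases hb : pvVowel c <;> push_cast [hb] <;> ring
    simp only [List.foldl_cons, ih]
    refine Prod.ext ?_ (by simp [hpf]; ring)
    simp only [List.length_cons, List.range_succ_eq_map, List.map_cons, List.map_map,
      List.append_assoc, List.singleton_append, hpf]
    congr 1
    congr 1
    · simp [pvPf]
    · refine List.map_congr_left ?_
      intro j _; simp [Function.comp]; ring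

lemma pvP_getD (cs : List Char) (i : Nat) (hi : i ≤ cs.length) :
    ([0] ++ (List.range cs.length).map (fun j => pvPf cs (j+1))).getD i 0 = pvPf cs i := by
  cases i with
  | zero => simp [pvPf]
  | succ m =>
    rw [List.getD_eq_getElem _ _ (by simpa using by omega : m + 1 < ([0] ++ (List.range cs.length).map (fun j => pvPf cs (j+1))).length)]
    simp

theorem max_sub_str_spec : Claim_equal_max_sub_str := by
  intro s k hdom hpre
  unfold Spec_max_sub_str
  obtain ⟨kn, rfl⟩ : ∃ kn : Nat, k = (kn : Int) := ⟨k.toNat, (Int.toNat_of_nonneg hpre).symm⟩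
  simp only [max_sub_str, max_sub_str_alt, PySem.List.len_eq, pvBuild,
    PySem.List.slice_zero_start, PySem.List.slice_to_natCast, PySem.List.foldl_if_add_one,
    zero_add]
  have hpf0 : ((List.countP pvVowel (List.take kn s.toList) : Nat) : Int) = pvPf s.toList kn := rfl
  rw [hpf0]
  have hfun : (fun (st : Int × Int × Int) right =>
        (if pvVowel (PySem.List.pyGetD s.toList right ' ') = true ∧ ¬ pvVowel (PySem.List.pyGetD s.toList st.2.1 ' ') = true
         then st.1 + 1
         else if ¬ pvVowel (PySem.List.pyGetD s.toList right ' ') = true ∧ pvVowel (PySem.List.pyGetD s.toList st.2.1 ' ') = true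
         then st.1 - 1 else st.1,
         st.2.1 + 1,
         max st.2.2
           (if pvVowel (PySem.List.pyGetD s.toList right ' ') = true ∧ ¬ pvVowel (PySem.List.pyGetD s.toList st.2.1 ' ') = true
            then st.1 + 1
            else if ¬ pvVowel (PySem.List.pyGetD s.toList right ' ') = true ∧ pvVowel (PySem.List.pyGetD s.toList st.2.1 ' ') = true
            then st.1 - 1 else st.1)))
      = pvStep s.toList := by
    funext st r
    simp only [pvStep, pvIf]
  rw [hfun]
  by_cases hk : s.toList.length ≤ kn
  · rw [if_pos (by exact_mod_cast hk)]
    rw [PySem.List.pyRange_one_eq_nil (by exact_mod_cast hk)]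
    rw [PySem.List.pyGetD_natCast, pvP_getD s.toList s.toList.length le_rfl]
    simp only [List.foldl_nil]
    unfold pvPf
    rw [List.take_of_length_le hk, List.take_of_length_le le_rfl]
  · rw [Nat.not_le] at hk
    rw [if_neg (by exact_mod_cast Nat.not_le.mpr hk)]
    -- A side via the loop invariant
    have hA := pvLoopA s.toList kn (s.toList.length - kn) 0 (pvPf s.toList kn) (by omega)
    have hpfz : pvPf s.toList 0 = 0 := by simp [pvPf]
    rw [Nat.zero_add, hpfz, sub_zero, Nat.cast_zero] at hA
    rw [hA]
    -- B side: rewrite the pyRange to a mapped List.range and index the prefix list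
    have hb1 : ((s.toList.length : Int) - (kn : Int) + 1) = ((s.toList.length - kn + 1 : Nat) : Int) := by
      push_cast [Nat.cast_sub (le_of_lt hk)]; ring
    rw [hb1, PySem.List.pyRange_one, List.foldl_map]
    have hb2 : (((s.toList.length - kn + 1 : Nat) : Int) - 1).toNat = s.toList.length - kn := by
      push_cast; omega
    rw [hb2]
    -- B's initial best = P[k] = pvPf kn
    rw [show PySem.List.pyGetD ([0] ++ (List.range s.toList.length).map (fun j => pvPf s.toList (j+1))) ((kn : Nat) : Int) 0
          = ([0] ++ (List.range s.toList.length).map (fun j => pvPf s.toList (j+1))).getD kn 0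
        from PySem.List.pyGetD_natCast _ _ _,
      pvP_getD s.toList kn (le_of_lt hk)]
    -- both folds run over List.range (n - kn); the bodies agree elementwise
    rw [List.range'_eq_map_range, List.foldl_map]
    simp only [Nat.zero_add]
    refine PySem.List.foldl_congr_mem _ _ _ _ ?_
    intro a j hj
    have hjlt : j < s.toList.length - kn := List.mem_range.mp hj
    have e1 : (1 : Int) + (j : Int) + (kn : Int) = (((1 + j) + kn : Nat) : Int) := by push_cast; ring
    have e2 : (1 : Int) + (j : Int) = ((1 + j : Nat) : Int) := by push_cast; ring
    rw [e1, e2, PySem.List.pyGetD_natCast, PySem.List.pyGetD_natCast,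
      pvP_getD s.toList ((1+j)+kn) (by omega), pvP_getD s.toList (1+j) (by omega)]
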